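-- pv_equiv track=rewrite | github.com/deniss619/Parse_Ozon | main.py | get_end
-- ===== SOURCE A (Python) =====
-- def get_end(l):
--     l = l % 100
--     if (l > 20):
--         return get_end(l % 10)
--
--     if (l == 1):
--         return 'а'
--     elif (2 <= l <= 4):
--         return 'и'
--     else:
--         return ''
-- ===== SOURCE B (Python) =====
-- def get_end(l):
--     d = l % 10
--     t = l % 100
--     if d == 1 and t != 11:
--         return 'а'
--     if 2 <= d <= 4 and not (12 <= t <= 14):
--         return 'и'
--     return ''
-- ===== Notes on version B (the rewrite author's own statement) =====
-- stated objective: idiomatic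
-- what changed: Replaces the %100-then-recurse-on-%10 reduction with the standard non-recursive Russian-plural digit test: last digit and teen-exception (d==1 and t!=11 -> 'а', 2<=d<=4 and t not in 12..14 -> 'и', else '').
import Mathlib
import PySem

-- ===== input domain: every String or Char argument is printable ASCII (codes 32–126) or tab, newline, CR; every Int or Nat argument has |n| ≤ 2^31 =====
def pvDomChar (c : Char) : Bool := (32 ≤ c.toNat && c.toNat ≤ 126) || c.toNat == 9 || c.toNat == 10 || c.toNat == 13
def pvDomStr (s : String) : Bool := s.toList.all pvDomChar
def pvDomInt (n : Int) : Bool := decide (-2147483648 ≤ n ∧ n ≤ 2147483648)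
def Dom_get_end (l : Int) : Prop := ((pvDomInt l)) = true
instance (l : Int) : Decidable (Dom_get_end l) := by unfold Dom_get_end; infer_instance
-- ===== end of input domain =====

-- ===== PORT A =====
-- A (literal): l = l % 100; if l > 20: return get_end(l % 10); then the small table.
-- The self-call is ported structurally with a fuel counter (2 suffices: after l % 100
-- the recursive argument is l % 10 < 10 ≤ 20, so the callee never recurses again);
-- the fuel is only a totality guard, never reached at 0 on any input.
def get_end_go (fuel : Nat) (l : Int) : String :=
  match fuel with
  | 0 => ""
  | fuel + 1 =>
    let m := PySem.Int.mod l 100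
    if m > 20 then get_end_go fuel (PySem.Int.mod m 10)
    else if m = 1 then "а"
    else if 2 ≤ m ∧ m ≤ 4 then "и"
    else ""

def get_end (l : Int) : String := get_end_go 2 l

-- ===== PORT B =====
-- B (literal): last-digit rule with the teen exception, no recursion.
def get_end_alt (l : Int) : String :=
  let d := PySem.Int.mod l 10
  let t := PySem.Int.mod l 100
  if d = 1 ∧ t ≠ 11 then "а"
  else if (2 ≤ d ∧ d ≤ 4) ∧ ¬ (12 ≤ t ∧ t ≤ 14) then "и"
  else ""

-- ===== PRECONDITION & SPEC =====
def Spec_get_end (l : Int) (out : String) : Prop := out = get_end_alt l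
instance (l : Int) (out : String) : Decidable (Spec_get_end l out) := by unfold Spec_get_end; infer_instance

-- ===== CLAIM (what is proved, stated in full; the proofs are below) =====
def Claim_equal_get_end : Prop := ∀ (l : Int), Dom_get_end l → Spec_get_end l (get_end l)

-- ===== LEMMAS AND PROOFS =====

-- the small result table, over Int and over Nat
def tbl (m : Int) : String := if m = 1 then "а" else if 2 ≤ m ∧ m ≤ 4 then "и" else ""
def tblN (m : Nat) : String := if m = 1 then "а" else if 2 ≤ m ∧ m ≤ 4 then "и" else ""

theorem tbl_natCast (n : Nat) : tbl (n : Int) = tblN n := by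
  unfold tbl tblN
  norm_cast

theorem get_end_eq (l : Int) :
    get_end l = (if l % 100 > 20 then tbl ((l % 100) % 10) else tbl (l % 100)) := by
  unfold get_end
  have hm : PySem.Int.mod l 100 = l % 100 := PySem.Int.mod_eq_emod_of_pos (by omega)
  simp only [get_end_go, hm]
  by_cases h : l % 100 > 20
  · rw [if_pos h, if_pos h]
    have hm2 : PySem.Int.mod (l % 100) 10 = (l % 100) % 10 :=
      PySem.Int.mod_eq_emod_of_pos (by omega)
    have hb1 : 0 ≤ (l % 100) % 10 := Int.emod_nonneg _ (by omega)
    have hb2 : (l % 100) % 10 < 10 := Int.emod_lt_of_pos _ (by omega)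
    have hm3 : PySem.Int.mod ((l % 100) % 10) 100 = (l % 100) % 10 := by
      rw [PySem.Int.mod_eq_emod_of_pos (by omega)]
      exact Int.emod_eq_of_lt hb1 (by omega)
    rw [hm2, hm3]
    rw [if_neg (by omega)]
    simp only [tbl]
  · rw [if_neg h, if_neg h]
    simp [tbl]

theorem get_end_alt_eq (l : Int) :
    get_end_alt l =
      (if ((l % 100) % 10 = 1 ∧ l % 100 ≠ 11) then "а"
       else if (2 ≤ (l % 100) % 10 ∧ (l % 100) % 10 ≤ 4) ∧ ¬ (12 ≤ l % 100 ∧ l % 100 ≤ 14)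
       then "и" else "") := by
  unfold get_end_alt
  have h1 : PySem.Int.mod l 10 = l % 10 := PySem.Int.mod_eq_emod_of_pos (by omega)
  have h2 : PySem.Int.mod l 100 = l % 100 := PySem.Int.mod_eq_emod_of_pos (by omega)
  rw [h1, h2, ← Int.emod_emod_of_dvd l (show (10:Int) ∣ 100 by norm_num)]

theorem keyN : ∀ n : Nat, n < 100 →
    (if 20 < n then tblN (n % 10) else tblN n)
    = (if (n % 10 = 1 ∧ n ≠ 11) then "а"
       else if (2 ≤ n % 10 ∧ n % 10 ≤ 4) ∧ ¬ (12 ≤ n ∧ n ≤ 14) then "и"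
       else "") := by
  intro n _
  unfold tblN
  by_cases h : 20 < n
  · simp only [if_pos h]
    split_ifs <;> first | rfl | omega
  · simp only [if_neg h]
    split_ifs <;> first | rfl | omega

-- ===== VERDICT (by name: the statement is the Claim_ definition above) =====
theorem get_end_spec : Claim_equal_get_end := by
  unfold Claim_equal_get_end Spec_get_end
  intro l _
  rw [get_end_eq, get_end_alt_eq]
  have hb : 0 ≤ l % 100 ∧ l % 100 < 100 :=
    ⟨Int.emod_nonneg l (by omega), Int.emod_lt_of_pos l (by omega)⟩
  obtain ⟨n, hn⟩ : ∃ n : Nat, (n : Int) = l % 100 := ⟨(l % 100).toNat, Int.toNat_of_nonneg hb.1⟩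
  have hn100 : n < 100 := by omega
  rw [← hn]
  have e1 : (n : Int) % 10 = ((n % 10 : Nat) : Int) := by push_cast; ring
  rw [e1, tbl_natCast, tbl_natCast]
  have hkey := keyN n hn100
  norm_cast
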